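-- pv_equiv track=rewrite | github.com/lymchgmk/Programmers-DevCourse-2nd-AI | Week 1/Day 5/lv3_게임아이템.py | solution
-- ===== SOURCE A (Python) =====
-- import heapq
-- from collections import deque
--
-- def solution(healths, items):
--     healths.sort()
--     # idx, 포인트, 체력감소 를 1 부터 enumerate
--     enum_items = [(idx, *item) for idx, item in enumerate(items, start=1)]
--     IDX, POINT, HP_MINUS = 0, 1, 2
--     # 감소체력 오름, 포인트 내림, idx 오름차순 정렬
--     enum_items.sort(key=lambda x: (x[HP_MINUS], -x[POINT], x[IDX]))
--     deq_enum_items = deque(enum_items)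
--
--     answer = []
--     hq = []
--     for health in healths:
--         while deq_enum_items and health - deq_enum_items[0][HP_MINUS] >= 100:
--             item = deq_enum_items.popleft()
--             # -포인트, idx
--             heapq.heappush(hq, (-item[POINT], item[IDX]))
--         if hq:
--             # idx 삽입
--             answer.append(heapq.heappop(hq)[1])
--
--     return sorted(answer)
-- ===== SOURCE B (Python) =====
-- import bisect
--
-- def solution(healths, items):
--     healths.sort()
--     # 1-indexed (idx, point, hp_minus), best point first (idx ascending on ties)
--     enum_items = [(idx, item[0], item[1]) for idx, item in enumerate(items, start=1)]
--     enum_items.sort(key=lambda x: (-x[1], x[0]))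
--     pool = healths[:]          # ascending healths still available
--     answer = []
--     for idx, point, hp_minus in enum_items:
--         j = bisect.bisect_left(pool, hp_minus + 100)
--         if j < len(pool):
--             pool.pop(j)
--             answer.append(idx)
--     return sorted(answer)
-- ===== Notes on version B (the rewrite author's own statement) =====
-- stated objective: alternative
-- what changed: A scans sorted healths and, per health, feeds newly-affordable items from a threshold-sorted deque into a max-heap and pops the best item; B instead iterates items in point-descending (idx-ascending) order and bisects a sorted pool of remaining healths for the smallest affordable one, removing it — loop over items instead of healths, sorted pool + binary search instead of deque + heap.
-- outside the precondition, e.g. on solution([200], [[5]]): A raises IndexError, B raises IndexError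
import Mathlib
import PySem

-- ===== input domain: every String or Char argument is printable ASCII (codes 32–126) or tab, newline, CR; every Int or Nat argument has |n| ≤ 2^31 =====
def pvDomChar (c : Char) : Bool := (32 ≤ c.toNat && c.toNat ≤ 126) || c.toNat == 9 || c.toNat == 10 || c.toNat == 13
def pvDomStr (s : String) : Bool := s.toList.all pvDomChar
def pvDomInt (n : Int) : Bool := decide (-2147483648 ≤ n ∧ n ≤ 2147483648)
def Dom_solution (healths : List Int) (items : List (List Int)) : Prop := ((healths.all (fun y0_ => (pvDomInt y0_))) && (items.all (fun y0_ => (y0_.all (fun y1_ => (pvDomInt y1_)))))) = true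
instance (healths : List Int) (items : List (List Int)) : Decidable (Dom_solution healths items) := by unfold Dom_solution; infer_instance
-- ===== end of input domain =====

-- B replaces A's health-major scan with a max-heap by an item-major greedy over a bisect-searched
-- sorted health pool (objective: alternative decomposition).  Both A and B sort `healths` in place
-- (`healths.sort()`); the equivalence proved here is about the RETURN value.
-- A's heapq heap is ported as a multiset (a list) with pushes appending and heappop extracting the
-- minimum element — observationally exact, since heappop always returns a minimal element and here
-- the heap's pairs (-point, idx) are pairwise distinct (idx is unique).
-- Python tuple sort keys are ported as lexicographic `toLex` keys.

-- ===== PORT A =====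
-- the inner `while deq and health - deq[0][HP_MINUS] >= 100: heappush(hq, (-point, idx))` loop
def pvPushA (h : Int) (dq : List (Int × Int × Int)) (hq : List (Int × Int)) :
    List (Int × Int × Int) × List (Int × Int) :=
  match dq with
  | [] => ([], hq)
  | x :: rest =>
      if 100 ≤ h - x.2.2 then pvPushA h rest (hq ++ [(-x.2.1, x.1)]) else (x :: rest, hq)

-- the `for health in healths` loop
def pvLoopA (healths : List Int) (dq : List (Int × Int × Int)) (hq : List (Int × Int))
    (ans : List Int) : List Int :=
  match healths with
  | [] => ans
  | h :: hs =>
      let s := pvPushA h dq hq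
      match PySem.List.min? s.2 (fun p => toLex p) with
      | some m => pvLoopA hs s.1 (s.2.erase m) (ans ++ [m.2])
      | none => pvLoopA hs s.1 s.2 ans

def solution (healths : List Int) (items : List (List Int)) : List Int :=
  let healths := PySem.List.sorted healths (fun x => x) false
  -- enum_items = [(idx, point, hp_minus)]  (further tuple components of A are never consulted)
  let enum := (PySem.List.enumerate items 1).map
    (fun p => (p.1, PySem.List.pyGetD p.2 0 0, PySem.List.pyGetD p.2 1 0))
  -- sort by (hp_minus, -point, idx)
  let enumS := PySem.List.sorted enum (fun x => toLex (x.2.2, toLex (-x.2.1, x.1))) false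
  let ans := pvLoopA healths enumS [] []
  PySem.List.sorted ans (fun x => x) false

-- ===== PORT B =====
def solution_alt (healths : List Int) (items : List (List Int)) : List Int :=
  let healths := PySem.List.sorted healths (fun x => x) false
  let enum := (PySem.List.enumerate items 1).map
    (fun p => (p.1, PySem.List.pyGetD p.2 0 0, PySem.List.pyGetD p.2 1 0))
  -- sort by (-point, idx)
  let enumS := PySem.List.sorted2 enum (fun x => -x.2.1) (fun x => x.1) false
  let st := enumS.foldl (fun (st : List Int × List Int) x =>
      let j := PySem.List.bisectLeft st.2 (x.2.2 + 100)
      if j < st.2.length then (st.1 ++ [x.1], st.2.eraseIdx j) else st) ([], healths)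
  PySem.List.sorted st.1 (fun x => x) false

-- ===== PRECONDITION & SPEC =====
-- Pre_ excludes exactly the inputs with an item of fewer than 2 entries, where A's sort key
-- (and B's tuple build) raises IndexError.
def Pre_solution (healths : List Int) (items : List (List Int)) : Prop :=
  ∀ it ∈ items, 2 ≤ it.length
instance (healths : List Int) (items : List (List Int)) : Decidable (Pre_solution healths items) := by
  unfold Pre_solution; infer_instance

def pvWitness_solution : List Int × List (List Int) := ([150, 300], [[10, 100], [5, 0]])

def Spec_solution (healths : List Int) (items : List (List Int)) (out : List Int) : Prop := out = solution_alt healths items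
instance (healths : List Int) (items : List (List Int)) (out : List Int) : Decidable (Spec_solution healths items out) := by unfold Spec_solution; infer_instance

-- ===== CLAIM (what is proved, stated in full; the proofs are below) =====
def Claim_equal_solution : Prop := ∀ (healths : List Int) (items : List (List Int)), Dom_solution healths items → Pre_solution healths items → Spec_solution healths items (solution healths items)

-- ===== LEMMAS AND PROOFS =====

-- item = (idx, point, hp_minus); heap/weight key (-point, idx), lexicographic
def pvK (x : Int × Int × Int) : Lex (Int × Int) := toLex (-x.2.1, x.1)
def pvEmb (x : Int × Int × Int) : Int × Int := (-x.2.1, x.1)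

-- abstract health-major process: at each health pick the available item of minimal key pvK
def pvProcA (healths : List Int) (S : List (Int × Int × Int)) : List Int :=
  match healths with
  | [] => []
  | h :: hs =>
      match PySem.List.min? (S.filter (fun x => decide (100 ≤ h - x.2.2))) pvK with
      | some m => m.1 :: pvProcA hs (S.erase m)
      | none => pvProcA hs S

-- abstract item-major process (B): best item first, smallest affordable health from the pool
def pvProcB (L : List (Int × Int × Int)) (pool : List Int) : List Int :=
  match L with
  | [] => []
  | x :: rest =>
      let j := PySem.List.bisectLeft pool (x.2.2 + 100)
      if j < pool.length then x.1 :: pvProcB rest (pool.eraseIdx j) else pvProcB rest pool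

def pvInjOn (S : List (Int × Int × Int)) : Prop :=
  ∀ a ∈ S, ∀ b ∈ S, pvK a = pvK b → a = b

theorem pv_min?_map {α β κ : Type} [LinearOrder κ] (f : α → β) (l : List α) (key : β → κ) :
    PySem.List.min? (l.map f) key = (PySem.List.min? l (fun a => key (f a))).map f := by
  simp only [PySem.List.min?, List.foldl_map]
  have aux : ∀ acc : Option α,
      l.foldl (fun acc a =>
        match acc with
        | none => some (f a)
        | some m => if key (f a) < key m then some (f a) else some m) (acc.map f)
      = (l.foldl (fun acc a =>
        match acc with
        | none => some a
        | some m => if (fun a => key (f a)) a < (fun a => key (f a)) m then some a else some m)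
          acc).map f := by
    induction l with
    | nil => intro acc; rfl
    | cons a t ih =>
        intro acc
        cases acc with
        | none => simpa using ih (some a)
        | some m =>
            by_cases hlt : key (f a) < key (f m)
            · simpa [hlt] using ih (some a)
            · simpa [hlt] using ih (some m)
  simpa using aux none

theorem pv_erase_map_injOn {α β : Type} [BEq α] [LawfulBEq α] [BEq β] [LawfulBEq β] (f : α → β) (l : List α)
    (m : α) (hinj : ∀ a ∈ l, f a = f m → a = m) :
    (l.map f).erase (f m) = (l.erase m).map f := by
  induction l with
  | nil => rfl
  | cons a t ih =>
      by_cases ha : f a = f m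
      · have ham : a = m := hinj a (by simp) ha
        simp [ham]
      · have ham : a ≠ m := fun h => ha (by rw [h])
        simp only [List.map_cons, List.erase_cons, beq_iff_eq, ha, ham, if_false]
        rw [ih (fun b hb hfb => hinj b (by simp [hb]) hfb)]

theorem pv_filter_erase {α : Type} [BEq α] [LawfulBEq α] (p : α → Bool) (l : List α) (x : α)
    (hx : p x = false) : (l.erase x).filter p = l.filter p := by
  induction l with
  | nil => rfl
  | cons a t ih =>
      by_cases ha : a = x
      · subst ha; simp [hx]
      · simp only [List.erase_cons, beq_iff_eq, ha, if_false, List.filter_cons]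
        cases hp : p a <;> simp [ih]

theorem pv_min?_eq_some {α κ : Type} [LinearOrder κ] {xs : List α} {key : α → κ} {m : α}
    (hm : m ∈ xs) (hmin : ∀ y ∈ xs, key m ≤ key y)
    (hinj : ∀ a ∈ xs, ∀ b ∈ xs, key a = key b → a = b) :
    PySem.List.min? xs key = some m := by
  cases hmm : PySem.List.min? xs key with
  | none =>
      rw [PySem.List.min?_eq_none_iff] at hmm
      subst hmm; simp at hm
  | some m' =>
      have h1 := PySem.List.min?_mem hmm
      have h2 := PySem.List.min?_isMin hmm m hm
      have h3 := hmin m' h1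
      have : m' = m := hinj m' h1 m hm (le_antisymm h2 h3)
      rw [this]

theorem pv_min?_congr_perm {α κ : Type} [LinearOrder κ] {xs ys : List α} (key : α → κ)
    (hp : xs.Perm ys) (hinj : ∀ a ∈ xs, ∀ b ∈ xs, key a = key b → a = b) :
    PySem.List.min? xs key = PySem.List.min? ys key := by
  cases hmm : PySem.List.min? xs key with
  | none =>
      rw [PySem.List.min?_eq_none_iff] at hmm
      subst hmm
      rw [eq_comm, PySem.List.min?_eq_none_iff]
      exact hp.nil_eq.symm
  | some m =>
      symm
      exact pv_min?_eq_some (hp.subset (PySem.List.min?_mem hmm))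
        (fun y hy => PySem.List.min?_isMin hmm y (hp.symm.subset hy))
        (fun a ha b hb => hinj a (hp.symm.subset ha) b (hp.symm.subset hb))

theorem pvProcA_nil (healths : List Int) : pvProcA healths [] = [] := by
  induction healths with
  | nil => rfl
  | cons h hs ih => simpa [pvProcA, PySem.List.min?] using ih

theorem pvProcA_perm (healths : List Int) (S S' : List (Int × Int × Int))
    (hp : S.Perm S') (hinj : pvInjOn S) : pvProcA healths S = pvProcA healths S' := by
  induction healths generalizing S S' with
  | nil => rfl
  | cons h hs ih =>
      have hmins : PySem.List.min? (S.filter (fun x => decide (100 ≤ h - x.2.2))) pvK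
          = PySem.List.min? (S'.filter (fun x => decide (100 ≤ h - x.2.2))) pvK :=
        pv_min?_congr_perm pvK (hp.filter _)
          (fun a ha b hb => hinj a (List.mem_of_mem_filter ha) b (List.mem_of_mem_filter hb))
      simp only [pvProcA, hmins]
      cases hm : PySem.List.min? (S'.filter (fun x => decide (100 ≤ h - x.2.2))) pvK with
      | none => exact ih S S' hp hinj
      | some m =>
          simp only []
          rw [ih (S.erase m) (S'.erase m) (hp.erase m)
            (fun a ha b hb => hinj a (List.erase_sublist.subset ha) b (List.erase_sublist.subset hb))]

theorem pvPushA_eq (h : Int) (dq : List (Int × Int × Int)) (hq : List (Int × Int)) :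
    pvPushA h dq hq =
      (dq.dropWhile (fun x => decide (100 ≤ h - x.2.2)),
       hq ++ (dq.takeWhile (fun x => decide (100 ≤ h - x.2.2))).map pvEmb) := by
  induction dq generalizing hq with
  | nil => simp [pvPushA]
  | cons x rest ih =>
      by_cases hc : 100 ≤ h - x.2.2
      · simp [pvPushA, hc, ih, pvEmb]
      · simp [pvPushA, hc]

theorem pv_filter_eq_takeWhile (h : Int) (l : List (Int × Int × Int))
    (hl : l.Pairwise (fun a b => a.2.2 ≤ b.2.2)) :
    l.filter (fun x => decide (100 ≤ h - x.2.2)) = l.takeWhile (fun x => decide (100 ≤ h - x.2.2)) := by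
  induction l with
  | nil => rfl
  | cons a t ih =>
      cases hp : decide (100 ≤ h - a.2.2) with
      | true =>
          simp only [List.filter_cons, List.takeWhile_cons, hp, if_true]
          rw [ih hl.of_cons]
      | false =>
          have hnil : List.filter (fun x => decide (100 ≤ h - x.2.2)) t = [] := by
            rw [List.filter_eq_nil_iff]
            intro b hb
            have h1 : a.2.2 ≤ b.2.2 := List.rel_of_pairwise_cons hl hb
            simp at hp ⊢
            omega
          simp [hp, hnil]

-- Step 1: the deque+heap loop of A computes the abstract health-major process
theorem pvLoopA_eq (healths : List Int) (dq U : List (Int × Int × Int)) (ans : List Int)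
    (hdq : dq.Pairwise (fun a b => a.2.2 ≤ b.2.2))
    (hU : ∀ x ∈ U, ∀ h ∈ healths, 100 ≤ h - x.2.2)
    (hasc : healths.Pairwise (· ≤ ·))
    (hinj : pvInjOn (U ++ dq)) :
    pvLoopA healths dq (U.map pvEmb) ans = ans ++ pvProcA healths (U ++ dq) := by
  induction healths generalizing dq U ans with
  | nil => simp [pvLoopA, pvProcA]
  | cons h hs ih =>
      have hhead : ∀ h' ∈ hs, h ≤ h' := fun h' hh => List.rel_of_pairwise_cons hasc hh
      have hUfilter : U.filter (fun x => decide (100 ≤ h - x.2.2)) = U :=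
        List.filter_eq_self.mpr (fun x hx => by
          simpa using hU x hx h (by simp))
      have htw : dq.filter (fun x => decide (100 ≤ h - x.2.2))
          = dq.takeWhile (fun x => decide (100 ≤ h - x.2.2)) :=
        pv_filter_eq_takeWhile h dq hdq
      have hfilterS : (U ++ dq).filter (fun x => decide (100 ≤ h - x.2.2))
          = U ++ dq.takeWhile (fun x => decide (100 ≤ h - x.2.2)) := by
        rw [List.filter_append, hUfilter, htw]
      have hsum : U ++ dq.takeWhile (fun x => decide (100 ≤ h - x.2.2))
            ++ dq.dropWhile (fun x => decide (100 ≤ h - x.2.2)) = U ++ dq := by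
        rw [List.append_assoc, List.takeWhile_append_dropWhile]
      have hUtw : ∀ x ∈ U ++ dq.takeWhile (fun x => decide (100 ≤ h - x.2.2)),
          ∀ h' ∈ hs, 100 ≤ h' - x.2.2 := by
        intro x hx h' hh'
        rcases List.mem_append.1 hx with hx | hx
        · exact hU x hx h' (by simp [hh'])
        · have h1 : 100 ≤ h - x.2.2 := by simpa using List.mem_takeWhile_imp hx
          have := hhead h' hh'
          omega
      have hdw : (dq.dropWhile (fun x => decide (100 ≤ h - x.2.2))).Pairwise
          (fun a b => a.2.2 ≤ b.2.2) := List.Pairwise.sublist (List.dropWhile_sublist _) hdq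
      have hsub : ((U ++ dq.takeWhile (fun x => decide (100 ≤ h - x.2.2)))
            ++ dq.dropWhile (fun x => decide (100 ≤ h - x.2.2))).Sublist (U ++ dq) := by
        rw [hsum]
      have hinj' : pvInjOn ((U ++ dq.takeWhile (fun x => decide (100 ≤ h - x.2.2)))
            ++ dq.dropWhile (fun x => decide (100 ≤ h - x.2.2))) := by
        rw [hsum]; exact hinj
      have hkey : (fun a => toLex (pvEmb a)) = pvK := rfl
      have hmin : PySem.List.min?
            ((U ++ dq.takeWhile (fun x => decide (100 ≤ h - x.2.2))).map pvEmb)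
            (fun p => toLex p)
          = (PySem.List.min? (U ++ dq.takeWhile (fun x => decide (100 ≤ h - x.2.2))) pvK).map
              pvEmb := by
        rw [pv_min?_map pvEmb _ (fun p => toLex p), hkey]
      simp only [pvLoopA, pvPushA_eq, pvProcA, hfilterS]
      rw [← List.map_append, hmin]
      cases hm : PySem.List.min? (U ++ dq.takeWhile (fun x => decide (100 ≤ h - x.2.2))) pvK with
      | none =>
          simp only [Option.map_none]
          rw [ih _ _ ans hdw hUtw hasc.of_cons hinj', hsum]
      | some m =>
          simp only [Option.map_some]
          have hmemtw := PySem.List.min?_mem hm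
          have hinjtw : ∀ a ∈ U ++ dq.takeWhile (fun x => decide (100 ≤ h - x.2.2)),
              pvEmb a = pvEmb m → a = m := by
            intro a ha hab
            refine hinj a ?_ m ?_ (congrArg toLex hab)
            · exact hsub.subset (List.mem_append_left _ ha)
            · exact hsub.subset (List.mem_append_left _ hmemtw)
          rw [pv_erase_map_injOn pvEmb _ m hinjtw]
          have herase : ((U ++ dq.takeWhile (fun x => decide (100 ≤ h - x.2.2))).erase m)
                ++ dq.dropWhile (fun x => decide (100 ≤ h - x.2.2)) = (U ++ dq).erase m := by
            rw [← List.erase_append_left _ hmemtw, hsum]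
          have hUe : ∀ x ∈ (U ++ dq.takeWhile (fun x => decide (100 ≤ h - x.2.2))).erase m,
              ∀ h' ∈ hs, 100 ≤ h' - x.2.2 :=
            fun x hx => hUtw x (List.erase_sublist.subset hx)
          have hinje : pvInjOn (((U ++ dq.takeWhile (fun x => decide (100 ≤ h - x.2.2))).erase m)
                ++ dq.dropWhile (fun x => decide (100 ≤ h - x.2.2))) := by
            intro a ha b hb
            have hsub2 : (((U ++ dq.takeWhile (fun x => decide (100 ≤ h - x.2.2))).erase m)
                ++ dq.dropWhile (fun x => decide (100 ≤ h - x.2.2))).Sublist (U ++ dq) := by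
              rw [herase]; exact List.erase_sublist
            exact hinj a (hsub2.subset ha) b (hsub2.subset hb)
          rw [ih _ _ (ans ++ [(pvEmb m).2]) hdw hUe hasc.of_cons hinje, herase]
          simp [pvEmb]

-- Step 2a: the globally best item is taken at its smallest affordable health
theorem pvExchangeFeasible (H1 : List Int) (hS : Int) (H2 : List Int)
    (S : List (Int × Int × Int)) (x : Int × Int × Int)
    (hx : x ∈ S) (hmin : ∀ y ∈ S, pvK x ≤ pvK y) (hinj : pvInjOn S)
    (h1 : ∀ h ∈ H1, h < x.2.2 + 100) (h2 : x.2.2 + 100 ≤ hS) :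
    (pvProcA (H1 ++ hS :: H2) S).Perm (x.1 :: pvProcA (H1 ++ H2) (S.erase x)) := by
  induction H1 generalizing S with
  | nil =>
      have hxf : x ∈ S.filter (fun y => decide (100 ≤ hS - y.2.2)) :=
        List.mem_filter.2 ⟨hx, by simp; omega⟩
      have hminf : PySem.List.min? (S.filter (fun y => decide (100 ≤ hS - y.2.2))) pvK = some x :=
        pv_min?_eq_some hxf (fun y hy => hmin y (List.mem_of_mem_filter hy))
          (fun a ha b hb => hinj a (List.mem_of_mem_filter ha) b (List.mem_of_mem_filter hb))
      simp only [List.nil_append, pvProcA, hminf]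
      exact List.Perm.refl _
  | cons h H1' ih =>
      have hpx : (fun y => decide (100 ≤ h - y.2.2)) x = false := by
        have := h1 h (by simp)
        simp; omega
      have hfe := pv_filter_erase (fun y => decide (100 ≤ h - y.2.2)) S x hpx
      simp only [List.cons_append, pvProcA, hfe]
      cases hm : PySem.List.min? (S.filter (fun y => decide (100 ≤ h - y.2.2))) pvK with
      | none =>
          exact ih S hx hmin hinj (fun h' hh' => h1 h' (by simp [hh']))
      | some m =>
          have hmf := PySem.List.min?_mem hm
          have hpm : (fun y => decide (100 ≤ h - y.2.2)) m = true := (List.mem_filter.1 hmf).2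
          have hne : x ≠ m := fun he => by rw [← he] at hpm; rw [hpx] at hpm; exact absurd hpm (by simp)
          have hxm : x ∈ S.erase m := (List.mem_erase_of_ne hne).2 hx
          have ihm := ih (S.erase m) hxm
            (fun y hy => hmin y (List.erase_sublist.subset hy))
            (fun a ha b hb => hinj a (List.erase_sublist.subset ha) b (List.erase_sublist.subset hb))
            (fun h' hh' => h1 h' (by simp [hh']))
          rw [List.erase_comm] at ihm
          exact (ihm.cons m.1).trans (List.Perm.swap x.1 m.1 _)

-- Step 2b: an item no health can afford never matters
theorem pvExchangeInfeasible (H : List Int) (S : List (Int × Int × Int)) (x : Int × Int × Int)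
    (hall : ∀ h ∈ H, h < x.2.2 + 100) :
    pvProcA H S = pvProcA H (S.erase x) := by
  induction H generalizing S with
  | nil => rfl
  | cons h hs ih =>
      have hpx : (fun y => decide (100 ≤ h - y.2.2)) x = false := by
        have := hall h (by simp)
        simp; omega
      have hfe := pv_filter_erase (fun y => decide (100 ≤ h - y.2.2)) S x hpx
      simp only [pvProcA, hfe]
      cases hm : PySem.List.min? (S.filter (fun y => decide (100 ≤ h - y.2.2))) pvK with
      | none => exact ih S (fun h' hh' => hall h' (by simp [hh']))
      | some m =>
          simp only []
          rw [ih (S.erase m) (fun h' hh' => hall h' (by simp [hh'])), List.erase_comm]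

theorem pv_injOn_of_pairwise_lt (L : List (Int × Int × Int))
    (h : L.Pairwise (fun a b => pvK a < pvK b)) : pvInjOn L := by
  rw [List.pairwise_iff_getElem] at h
  intro a ha b hb heq
  obtain ⟨i, hi, rfl⟩ := List.mem_iff_getElem.1 ha
  obtain ⟨j, hj, rfl⟩ := List.mem_iff_getElem.1 hb
  rcases lt_trichotomy i j with hij | hij | hij
  · exact absurd heq (ne_of_lt (h i j hi hj hij))
  · simp [hij]
  · exact absurd heq.symm (ne_of_lt (h j i hj hi hij))

-- Step 3: the two abstract processes agree (as multisets)
theorem pvMain (L : List (Int × Int × Int)) (pool : List Int)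
    (hL : L.Pairwise (fun a b => pvK a < pvK b))
    (hpool : pool.Pairwise (· ≤ ·)) :
    (pvProcA pool L).Perm (pvProcB L pool) := by
  induction L generalizing pool with
  | nil => rw [pvProcA_nil]; rfl
  | cons x rest ih =>
      have spec := PySem.List.bisectLeft_spec pool (x.2.2 + 100) hpool
      by_cases hj : PySem.List.bisectLeft pool (x.2.2 + 100) < pool.length
      · have hsplit : pool = pool.take (PySem.List.bisectLeft pool (x.2.2 + 100))
            ++ pool[PySem.List.bisectLeft pool (x.2.2 + 100)]
              :: pool.drop (PySem.List.bisectLeft pool (x.2.2 + 100) + 1) := by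
          conv_lhs => rw [← List.take_append_drop (PySem.List.bisectLeft pool (x.2.2 + 100)) pool]
          rw [List.drop_eq_getElem_cons hj]
        have h1 : ∀ h ∈ pool.take (PySem.List.bisectLeft pool (x.2.2 + 100)), h < x.2.2 + 100 := by
          intro h hh
          obtain ⟨i, hi, rfl⟩ := List.mem_iff_getElem.1 hh
          have hij : i < PySem.List.bisectLeft pool (x.2.2 + 100) := by
            simpa using lt_of_lt_of_le hi (by simp)
          rw [List.getElem_take]
          exact spec.2.1 i (lt_of_lt_of_le hij (le_of_lt hj)) hij
        have h2' : x.2.2 + 100 ≤ pool[PySem.List.bisectLeft pool (x.2.2 + 100)] :=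
          spec.2.2 _ hj (le_refl _)
        have hmin : ∀ y ∈ x :: rest, pvK x ≤ pvK y := by
          intro y hy
          rcases List.mem_cons.1 hy with rfl | hy
          · exact le_refl _
          · exact le_of_lt (List.rel_of_pairwise_cons hL hy)
        have hexch := pvExchangeFeasible
          (pool.take (PySem.List.bisectLeft pool (x.2.2 + 100)))
          (pool[PySem.List.bisectLeft pool (x.2.2 + 100)]'hj)
          (pool.drop (PySem.List.bisectLeft pool (x.2.2 + 100) + 1)) (x :: rest) x (by simp) hmin
          (pv_injOn_of_pairwise_lt _ hL) h1 h2'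
        rw [List.erase_cons_head] at hexch
        have hpool' : (pool.take (PySem.List.bisectLeft pool (x.2.2 + 100))
            ++ pool.drop (PySem.List.bisectLeft pool (x.2.2 + 100) + 1)).Pairwise (· ≤ ·) := by
          rw [← List.eraseIdx_eq_take_drop_succ]
          exact List.Pairwise.sublist (List.eraseIdx_sublist _ _) hpool
        have ihx := ih _ hL.of_cons hpool'
        have hstep : (pvProcA pool (x :: rest)).Perm
            (x.1 :: pvProcB rest (pool.take (PySem.List.bisectLeft pool (x.2.2 + 100))
              ++ pool.drop (PySem.List.bisectLeft pool (x.2.2 + 100) + 1))) := by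
          conv_lhs => rw [hsplit]
          exact hexch.trans (ihx.cons x.1)
        have hB : pvProcB (x :: rest) pool
            = x.1 :: pvProcB rest (pool.eraseIdx (PySem.List.bisectLeft pool (x.2.2 + 100))) := by
          simp only [pvProcB]
          rw [if_pos hj]
        rw [hB, List.eraseIdx_eq_take_drop_succ]
        exact hstep
      · have hall : ∀ h ∈ pool, h < x.2.2 + 100 := by
          intro h hh
          obtain ⟨i, hi, rfl⟩ := List.mem_iff_getElem.1 hh
          exact spec.2.1 i hi (by omega)
        have heq := pvExchangeInfeasible pool (x :: rest) x hall
        rw [List.erase_cons_head] at heq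
        have hB : pvProcB (x :: rest) pool = pvProcB rest pool := by
          simp only [pvProcB]
          rw [if_neg hj]
        rw [heq, hB]
        exact ih pool hL.of_cons hpool

theorem pvFoldB (L : List (Int × Int × Int)) (ans pool : List Int) :
    (L.foldl (fun (st : List Int × List Int) x =>
      let j := PySem.List.bisectLeft st.2 (x.2.2 + 100)
      if j < st.2.length then (st.1 ++ [x.1], st.2.eraseIdx j) else st) (ans, pool)).1
      = ans ++ pvProcB L pool := by
  induction L generalizing ans pool with
  | nil => simp [pvProcB]
  | cons x rest ih =>
      simp only [List.foldl_cons, pvProcB]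
      by_cases hc : PySem.List.bisectLeft pool (x.2.2 + 100) < pool.length
      · simp only [hc, if_true, ih]
        simp
      · simp only [hc, if_false, ih]

theorem pv_sorted2_eq (xs : List (Int × Int × Int)) :
    PySem.List.sorted2 xs (fun x => -x.2.1) (fun x => x.1) false
      = PySem.List.sorted xs pvK false := by
  rw [PySem.List.sorted_eq_foldl_insertBy]
  simp only [PySem.List.sorted2]
  have hb : (fun (a b : Int × Int × Int) =>
        (decide (-a.2.1 < -b.2.1) || (!decide (-b.2.1 < -a.2.1) && decide (a.1 < b.1))))
      = fun a b => decide (pvK a < pvK b) := by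
    funext a b
    by_cases h1 : (-a.2.1 : Int) < -b.2.1 <;> by_cases h2 : (-b.2.1 : Int) < -a.2.1
    · omega
    · simp [pvK, Prod.Lex.toLex_lt_toLex, h1, h2]
    · simp [pvK, Prod.Lex.toLex_lt_toLex, h1, h2]; omega
    · have he : (-a.2.1 : Int) = -b.2.1 := by omega
      simp [pvK, Prod.Lex.toLex_lt_toLex, he]
  rw [hb]
  simp

theorem pvK_eq_idx {a b : Int × Int × Int} (h : pvK a = pvK b) : a.1 = b.1 := by
  have h2 : ((-a.2.1 : Int), a.1) = ((-b.2.1 : Int), b.1) := congrArg ofLex h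
  exact (Prod.mk.injEq _ _ _ _ ▸ h2).2

theorem pv_injOn_of_nodup_idx (S : List (Int × Int × Int))
    (h : (S.map (fun x => x.1)).Nodup) : pvInjOn S := by
  intro a ha b hb hk
  exact List.inj_on_of_nodup_map h ha hb (pvK_eq_idx hk)

theorem pv_idx_nodup (items : List (List Int)) :
    (((PySem.List.enumerate items 1).map
      (fun p => (p.1, PySem.List.pyGetD p.2 0 0, PySem.List.pyGetD p.2 1 0))).map
        (fun x => x.1)).Nodup := by
  rw [List.map_map]
  have hc : ((fun (x : Int × Int × Int) => x.1) ∘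
      (fun (p : Int × List Int) => (p.1, PySem.List.pyGetD p.2 0 0, PySem.List.pyGetD p.2 1 0)))
      = fun (p : Int × List Int) => p.1 := rfl
  rw [hc, PySem.List.map_fst_enumerate]
  exact PySem.List.nodup_pyRange_one _ _

theorem pv_final (healths : List Int) (items : List (List Int)) :
    solution healths items = solution_alt healths items := by
  simp only [solution, solution_alt, pv_sorted2_eq, pvFoldB, List.nil_append]
  set H := PySem.List.sorted healths (fun x => x) false with hHdef
  set E := (PySem.List.enumerate items 1).map
    (fun p => (p.1, PySem.List.pyGetD p.2 0 0, PySem.List.pyGetD p.2 1 0)) with hEdef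
  set Sσ := PySem.List.sorted E (fun x => toLex (x.2.2, toLex (-x.2.1, x.1))) false with hSdef
  set L := PySem.List.sorted E pvK false with hLdef
  have hHpair : H.Pairwise (· ≤ ·) := PySem.List.sorted_pairwise healths (fun x => x)
  have hSEperm : Sσ.Perm E := PySem.List.sorted_perm E _ false
  have hLEperm : L.Perm E := PySem.List.sorted_perm E _ false
  have hidxE : (E.map (fun x => x.1)).Nodup := pv_idx_nodup items
  have hidxS : (Sσ.map (fun x => x.1)).Nodup := ((hSEperm.map _).nodup_iff).2 hidxE
  have hidxL : (L.map (fun x => x.1)).Nodup := ((hLEperm.map _).nodup_iff).2 hidxE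
  have hinjS : pvInjOn Sσ := pv_injOn_of_nodup_idx Sσ hidxS
  have hdqpair : Sσ.Pairwise (fun a b => a.2.2 ≤ b.2.2) := by
    refine (PySem.List.sorted_pairwise E _).imp ?_
    intro a b hab
    rcases Prod.Lex.toLex_le_toLex.1 hab with h | ⟨h, _⟩
    · exact le_of_lt h
    · exact le_of_eq h
  have hloopa : pvLoopA H Sσ [] [] = pvProcA H Sσ := by
    have := pvLoopA_eq H Sσ [] [] hdqpair (by simp) hHpair (by simpa using hinjS)
    simpa using this
  have hprocAeq : pvProcA H Sσ = pvProcA H L :=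
    pvProcA_perm H Sσ L (hSEperm.trans hLEperm.symm) hinjS
  have hLne : L.Pairwise (fun a b => a.1 ≠ b.1) := List.pairwise_map.mp hidxL
  have hLle : L.Pairwise (fun a b => pvK a ≤ pvK b) := PySem.List.sorted_pairwise E pvK
  have hLpair : L.Pairwise (fun a b => pvK a < pvK b) := by
    refine (hLle.and hLne).imp ?_
    rintro a b ⟨hle, hne⟩
    exact lt_of_le_of_ne hle (fun heq => hne (pvK_eq_idx heq))
  have hperm : (pvLoopA H Sσ [] []).Perm (pvProcB L H) := by
    rw [hloopa, hprocAeq]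
    exact pvMain L H hLpair hHpair
  exact PySem.List.sorted_eq_sorted_of_perm _ _ _ (fun a b h => h) hperm

-- ===== VERDICT (by name: the statement is the Claim_ definition above) =====
theorem solution_spec : Claim_equal_solution := by
  intro healths items _ _
  unfold Spec_solution
  exact pv_final healths items
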